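-- pv_equiv track=rewrite | github.com/chestnut1717/Algorithm | 프로그래머스/2/138476. 귤 고르기/귤 고르기.py | solution
-- ===== SOURCE A (Python) =====
-- def solution(kk, tangerine):
--     answer = 0
--
--     mapDict = {}
--     for num in tangerine:
--         if num in mapDict.keys():
--             mapDict[num] += 1
--         else:
--             mapDict[num] = 1
--
--     newDict = {k: v for k, v in sorted(mapDict.items(), key=lambda item: item[1], reverse=True)}
--
--     for k, v in newDict.items():
--         kk -= v
--         answer+= 1
--         if kk <= 0:
--             break
--
--
--     return answer
-- ===== SOURCE B (Python) =====
-- def solution(kk, tangerine):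
--     # Count each tangerine size, then bucket the frequencies by value and walk
--     # the frequency range largest-first: no comparison sort is needed.
--     freq = {}
--     for t in tangerine:
--         freq[t] = freq.get(t, 0) + 1
--     n = len(tangerine)
--     buckets = {}
--     for f in freq.values():
--         buckets[f] = buckets.get(f, 0) + 1
--     answer = 0
--     for f in range(n, 0, -1):
--         for _ in range(buckets.get(f, 0)):
--             kk -= f
--             answer += 1
--             if kk <= 0:
--                 return answer
--     return answer
-- ===== Notes on version B (the rewrite author's own statement) =====
-- stated objective: alternative
-- what changed: Replaces sorting the frequency table and rebuilding a dict with a counting-sort style pass: frequencies are bucketed by value and consumed largest-first over the range n..1, so no comparison sort is performed.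
import Mathlib
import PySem

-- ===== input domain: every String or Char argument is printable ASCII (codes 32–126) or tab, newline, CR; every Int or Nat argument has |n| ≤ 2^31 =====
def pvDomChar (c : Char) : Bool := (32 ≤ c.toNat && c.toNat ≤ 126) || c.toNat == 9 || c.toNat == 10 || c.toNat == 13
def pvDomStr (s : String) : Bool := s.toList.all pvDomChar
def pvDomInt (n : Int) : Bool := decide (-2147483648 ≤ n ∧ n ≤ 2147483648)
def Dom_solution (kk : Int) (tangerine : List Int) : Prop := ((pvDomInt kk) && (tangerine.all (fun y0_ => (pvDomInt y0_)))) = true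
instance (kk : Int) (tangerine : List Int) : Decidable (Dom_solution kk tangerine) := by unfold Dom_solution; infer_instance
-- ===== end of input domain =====

-- B replaces A's comparison sort of the frequency table by frequency buckets walked
-- largest-first over the range n..1 (a counting-sort pass); same return value everywhere.

-- ===== PORT A =====
-- A's final 'for k, v in newDict.items(): kk -= v; answer += 1; if kk <= 0: break'
def aloop : Int → Int → List (Int × Int) → Int
  | _, answer, [] => answer
  | kk, answer, (_, v) :: rest =>
      if kk - v ≤ 0 then answer + 1 else aloop (kk - v) (answer + 1) rest

def solution (kk : Int) (tangerine : List Int) : Int :=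
  let mapDict : PySem.Dict Int Int :=
    tangerine.foldl
      (fun d num => if d.contains num then d.modify num 0 (· + 1) else d.insert num 1)
      PySem.Dict.empty
  let sortedItems := PySem.List.sorted mapDict.items (fun item => item.2) true
  let newDict : PySem.Dict Int Int :=
    sortedItems.foldl (fun d p => d.insert p.1 p.2) PySem.Dict.empty
  aloop kk 0 newDict.items

-- ===== PORT B =====
-- B's inner 'for _ in range(buckets.get(f, 0)): kk -= f; answer += 1; if kk <= 0: return answer'
-- result: (kk, answer, early-return?)
def bInner : Nat → Int → Int → Int → Int × Int × Bool
  | 0, _, kk, answer => (kk, answer, false)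
  | c + 1, f, kk, answer =>
      if kk - f ≤ 0 then (kk - f, answer + 1, true)
      else bInner c f (kk - f) (answer + 1)

-- B's outer 'for f in range(n, 0, -1)': the Nat argument is the current f
def bOuter (buckets : PySem.Dict Int Int) : Nat → Int → Int → Int
  | 0, _, answer => answer
  | f + 1, kk, answer =>
      match bInner (buckets.getD ((f : Int) + 1) 0).toNat ((f : Int) + 1) kk answer with
      | (_, ans, true) => ans
      | (kk', ans, false) => bOuter buckets f kk' ans

def solution_alt (kk : Int) (tangerine : List Int) : Int :=
  let freq : PySem.Dict Int Int :=
    tangerine.foldl (fun d t => d.insert t (d.getD t 0 + 1)) PySem.Dict.empty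
  let n := tangerine.length
  let buckets : PySem.Dict Int Int :=
    freq.values.foldl (fun d f => d.insert f (d.getD f 0 + 1)) PySem.Dict.empty
  bOuter buckets n kk 0

-- ===== PRECONDITION & SPEC =====
def Spec_solution (kk : Int) (tangerine : List Int) (out : Int) : Prop := out = solution_alt kk tangerine
instance (kk : Int) (tangerine : List Int) (out : Int) : Decidable (Spec_solution kk tangerine out) := by unfold Spec_solution; infer_instance

-- ===== CLAIM (what is proved, stated in full; the proofs are below) =====
def Claim_equal_solution : Prop := ∀ (kk : Int) (tangerine : List Int), Dom_solution kk tangerine → Spec_solution kk tangerine (solution kk tangerine)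

-- ===== LEMMAS AND PROOFS =====

-- the take-one-type-at-a-time loop, on the list of frequencies only
def vloop : Int → Int → List Int → Int
  | _, ans, [] => ans
  | kk, ans, v :: rest => if kk - v ≤ 0 then ans + 1 else vloop (kk - v) (ans + 1) rest

-- frequencies listed largest-first from their counts: n, …, 1
def descL (vs : List Int) : Nat → List Int
  | 0 => []
  | f + 1 => List.replicate (vs.count ((f : Int) + 1)) ((f : Int) + 1) ++ descL vs f

lemma aloop_eq_vloop : ∀ (l : List (Int × Int)) (kk ans : Int),
    aloop kk ans l = vloop kk ans (l.map (·.2)) := by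
  intro l
  induction l with
  | nil => intro kk ans; rfl
  | cons p t ih =>
      intro kk ans
      obtain ⟨k, v⟩ := p
      simp only [aloop, vloop, List.map_cons]
      split_ifs with h
      · rfl
      · exact ih _ _

lemma bInner_spec : ∀ (c : Nat) (f kk ans : Int) (rest : List Int),
    vloop kk ans (List.replicate c f ++ rest) =
      (match bInner c f kk ans with
       | (_, a, true) => a
       | (kk', a, false) => vloop kk' a rest) := by
  intro c
  induction c with
  | zero => intro f kk ans rest; rfl
  | succ c ih =>
      intro f kk ans rest
      simp only [List.replicate_succ, List.cons_append, vloop, bInner]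
      split_ifs with h
      · rfl
      · exact ih f (kk - f) (ans + 1) rest

lemma bOuter_spec (buckets : PySem.Dict Int Int) (vs : List Int)
    (h : ∀ i : Int, buckets.getD i 0 = vs.count i) :
    ∀ (n : Nat) (kk ans : Int), bOuter buckets n kk ans = vloop kk ans (descL vs n) := by
  intro n
  induction n with
  | zero => intro kk ans; rfl
  | succ f ih =>
      intro kk ans
      simp only [bOuter, descL, h, Int.toNat_natCast]
      rw [bInner_spec]
      rcases hb : bInner (vs.count ((f : Int) + 1)) ((f : Int) + 1) kk ans with ⟨kk', a, done⟩
      cases done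
      · simp only [ih]
      · rfl

lemma desc_decomp (c : Int) : ∀ (l : List Int), l.Pairwise (fun a b => b ≤ a) →
    (∀ x ∈ l, x ≤ c) →
    l = List.replicate (l.count c) c ++ l.filter (fun x => x ≠ c) := by
  intro l
  induction l with
  | nil => intro _ _; rfl
  | cons x t ih =>
      intro hp hb
      have hx : ∀ y ∈ t, y ≤ x := (List.pairwise_cons.mp hp).1
      have hpt := (List.pairwise_cons.mp hp).2
      by_cases hxc : x = c
      · subst hxc
        have := ih hpt (fun y hy => hb y (List.mem_cons_of_mem _ hy))
        simp only [List.count_cons_self, List.replicate_succ, List.cons_append,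
          List.filter_cons]
        simp only [ne_eq, not_true_eq_false, decide_false]
        exact congrArg (x :: ·) this
      · have hlt : x < c := lt_of_le_of_ne (hb x (List.mem_cons_self)) hxc
        have hnot : c ∉ x :: t := by
          intro hc
          rcases List.mem_cons.mp hc with h | h
          · exact hxc h.symm
          · exact absurd (lt_of_le_of_lt (hx c h) hlt) (lt_irrefl c)
        have hcount : (x :: t).count c = 0 := List.count_eq_zero.mpr hnot
        have hfil : (x :: t).filter (fun x => x ≠ c) = x :: t := by
          apply List.filter_eq_self.mpr
          intro a ha
          simp only [ne_eq, decide_eq_true_eq]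
          intro hac
          exact hnot (hac ▸ ha)
        rw [hcount, hfil]
        rfl

lemma descL_congr : ∀ (n : Nat) (vs vs' : List Int),
    (∀ i : Int, 1 ≤ i → i ≤ (n : Int) → vs.count i = vs'.count i) →
    descL vs n = descL vs' n := by
  intro n
  induction n with
  | zero => intro _ _ _; rfl
  | succ f ih =>
      intro vs vs' h
      simp only [descL]
      rw [h ((f : Int) + 1) (by omega) (by push_cast; omega),
        ih vs vs' (fun i h1 h2 => h i h1 (by push_cast at h2 ⊢; omega))]

lemma descL_eq : ∀ (n : Nat) (l : List Int), l.Pairwise (fun a b => b ≤ a) →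
    (∀ x ∈ l, 1 ≤ x ∧ x ≤ (n : Int)) → descL l n = l := by
  intro n
  induction n with
  | zero =>
      intro l _ hb
      cases l with
      | nil => rfl
      | cons x t =>
          exact absurd (hb x List.mem_cons_self) (by push_cast; omega)
  | succ f ih =>
      intro l hp hb
      have hdec := desc_decomp ((f : Int) + 1) l hp
        (fun x hx => by have := (hb x hx).2; push_cast at this ⊢; omega)
      set l' := l.filter (fun x => x ≠ ((f : Int) + 1)) with hl'
      have hsub : l'.Sublist l := List.filter_sublist
      have hcounts : ∀ i : Int, 1 ≤ i → i ≤ (f : Int) → l.count i = l'.count i := by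
        intro i h1 h2
        rw [hl', List.count_filter]
        simp only [ne_eq, decide_eq_true_eq]
        have : ¬ i = (f : Int) + 1 := by omega
        simp [this]
      have hrec : descL l f = l' := by
        rw [descL_congr f l l' hcounts]
        apply ih
        · exact hp.sublist hsub
        · intro x hx
          have hxl : x ∈ l := hsub.mem hx
          have h1 := (hb x hxl).1
          have h2 := (hb x hxl).2
          have hne : x ≠ (f : Int) + 1 := by
            have := List.of_mem_filter hx
            simpa using this
          constructor
          · exact h1
          · push_cast at h2 ⊢; omega
      simp only [descL, hrec]
      exact hdec.symm

-- counting loop with membership test = Counter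
lemma mapDict_eq_counter (tangerine : List Int) :
    tangerine.foldl
      (fun d num => if d.contains num then d.modify num 0 (· + 1) else d.insert num 1)
      PySem.Dict.empty = PySem.Dict.counter tangerine := by
  rw [PySem.Dict.counter_eq_foldl]
  apply PySem.List.foldl_congr_mem
  intro d num _
  by_cases hc : d.contains num
  · simp [hc]
  · simp only [Bool.not_eq_true] at hc
    simp only [hc]
    simp [PySem.Dict.insert, PySem.Dict.modify, hc, PySem.Dict.getD_of_not_contains]

-- ===== VERDICT (by name: the statement is the Claim_ definition above) =====
theorem solution_spec : Claim_equal_solution := by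
  intro kk tangerine _
  unfold Spec_solution
  -- shared data
  set items := (PySem.Dict.counter tangerine : PySem.Dict Int Int).items with hitems
  set sortedItems := PySem.List.sorted items (fun item : Int × Int => item.2) true with hsorted
  set svs := sortedItems.map (·.2) with hsvs
  set values := (PySem.Dict.counter tangerine : PySem.Dict Int Int).values with hvalues
  -- A's side
  have hperm : sortedItems.Perm items := PySem.List.sorted_perm items _ true
  have hkeysnodup : (items.map (·.1)).Nodup := by
    have := PySem.Dict.nodup_keys_counter (xs := tangerine)
    simp only [PySem.Dict.keys] at this
    exact this
  have hnodup : (sortedItems.map (·.1)).Nodup :=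
    ((hperm.map (·.1)).nodup_iff).mpr hkeysnodup
  have hA : solution kk tangerine = vloop kk 0 svs := by
    simp only [solution, mapDict_eq_counter, ← hitems, ← hsorted]
    rw [PySem.Dict.items_foldl_insert_fresh sortedItems (fun p => p.1) (fun p => p.2)
      PySem.Dict.empty (by intro a _; simp) hnodup]
    rw [aloop_eq_vloop]
    simp [PySem.Dict.empty, hsvs]
  -- B's side
  have hBbuckets : ∀ i : Int,
      (PySem.Dict.counter values : PySem.Dict Int Int).getD i 0 = values.count i := by
    intro i
    exact PySem.Dict.getD_counter values i
  have hB : solution_alt kk tangerine = vloop kk 0 (descL values tangerine.length) := by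
    simp only [solution_alt, PySem.Dict.foldl_insert_getD_add_one_eq_counter, ← hvalues]
    exact bOuter_spec _ values hBbuckets tangerine.length kk 0
  -- svs is sorted descending, consists of counts in [1, n], and is a permutation of values
  have hpair : svs.Pairwise (fun a b => b ≤ a) := by
    rw [hsvs, List.pairwise_map]
    exact PySem.List.sorted_pairwise_rev items (fun item : Int × Int => item.2)
  have hbounds : ∀ x ∈ svs, 1 ≤ x ∧ x ≤ (tangerine.length : Int) := by
    intro x hx
    rw [hsvs] at hx
    obtain ⟨p, hp, hpx⟩ := List.mem_map.mp hx
    rw [PySem.List.mem_sorted] at hp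
    rw [hitems, PySem.Dict.items_counter] at hp
    obtain ⟨k, hk, hkp⟩ := List.mem_map.mp hp
    have hkmem : k ∈ tangerine := (PySem.Set.mem_ofList _ _).mp hk
    have : x = (tangerine.count k : Int) := by rw [← hpx, ← hkp]
    subst this
    constructor
    · exact_mod_cast List.count_pos_iff.mpr hkmem
    · exact_mod_cast List.count_le_length
  have hpermv : svs.Perm values := by
    have := hperm.map (·.2)
    simpa [hsvs, hvalues, PySem.Dict.values, hitems] using this
  have hcnt : ∀ i : Int, 1 ≤ i → i ≤ (tangerine.length : Int) →
      values.count i = svs.count i := fun i _ _ => (hpermv.count_eq i).symm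
  rw [hA, hB, descL_congr tangerine.length values svs hcnt,
    descL_eq tangerine.length svs hpair hbounds]
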